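-- pv_equiv track=rewrite | github.com/18fadly-anthony/spaceship-traitors | bot.py | redraw
-- ===== SOURCE A (Python) =====
-- def redraw(height, length, position, target_position, asteroid_positions):
--     map = ""
--     for i in range(1, height + 1):
--         for j in range(1, length + 1):
--             if [i, j] == position:
--                 map += ("+")
--             elif [i, j] == target_position:
--                 map += ("o")
--             elif [i, j] in asteroid_positions:
--                 map += ("x")
--             else:
--                 map += ("~")
--         map += "\n"
--     return map
-- ===== SOURCE B (Python) =====
-- def redraw(height, length, position, target_position, asteroid_positions):
--     h = max(height, 0)
--     l = max(length, 0)
--     grid = [['~'] * l for _ in range(h)]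
--
--     def paint(cell, ch):
--         if len(cell) == 2 and 1 <= cell[0] <= h and 1 <= cell[1] <= l:
--             grid[cell[0] - 1][cell[1] - 1] = ch
--
--     for a in asteroid_positions:
--         paint(a, 'x')
--     paint(target_position, 'o')
--     paint(position, '+')
--     return ''.join(''.join(row) + '\n' for row in grid)
-- ===== Notes on version B (the rewrite author's own statement) =====
-- stated objective: faster
-- what changed: Instead of scanning every cell and testing it against the player, target and the whole asteroid list, B allocates a '~'-filled 2D grid once and paints only the entities onto it (asteroids first, then target, then player, so overwrites reproduce A's priority), then joins the rows.
import Mathlib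
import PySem

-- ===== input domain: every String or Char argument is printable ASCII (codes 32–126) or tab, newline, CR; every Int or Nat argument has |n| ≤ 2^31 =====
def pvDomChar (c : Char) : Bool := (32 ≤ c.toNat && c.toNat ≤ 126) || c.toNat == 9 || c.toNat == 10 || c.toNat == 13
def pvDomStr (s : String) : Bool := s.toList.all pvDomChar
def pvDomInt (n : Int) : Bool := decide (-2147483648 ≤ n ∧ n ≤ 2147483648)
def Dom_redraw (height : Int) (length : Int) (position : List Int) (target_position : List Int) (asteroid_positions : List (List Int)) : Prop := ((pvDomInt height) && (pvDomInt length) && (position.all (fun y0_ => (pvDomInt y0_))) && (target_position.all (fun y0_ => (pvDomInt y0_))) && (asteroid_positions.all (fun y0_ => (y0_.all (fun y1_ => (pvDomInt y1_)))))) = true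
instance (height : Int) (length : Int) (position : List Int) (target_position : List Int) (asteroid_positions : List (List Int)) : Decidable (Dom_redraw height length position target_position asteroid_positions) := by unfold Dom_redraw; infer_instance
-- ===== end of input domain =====

-- B builds the '~' grid once and paints only the entities (asteroids, then target, then player),
-- instead of testing every cell against every entity: an asymptotic speed-up, same output.

-- ===== PORT A =====
def redraw (height : Int) (length : Int) (position : List Int) (target_position : List Int) (asteroid_positions : List (List Int)) : String :=
  String.ofList <|
    (PySem.List.pyRange 1 (height + 1) 1).foldl (fun m i =>
      ((PySem.List.pyRange 1 (length + 1) 1).foldl (fun m j =>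
        if [i, j] = position then m ++ ['+']
        else if [i, j] = target_position then m ++ ['o']
        else if [i, j] ∈ asteroid_positions then m ++ ['x']
        else m ++ ['~']) m) ++ ['\n']) []

-- ===== PORT B =====
-- write ch at (one-based) cell if it is a two-element coordinate inside the grid
def pvPaint (h l : Int) (g : List (List Char)) (cell : List Int) (ch : Char) : List (List Char) :=
  match cell with
  | [i, j] =>
    if 1 ≤ i ∧ i ≤ h ∧ 1 ≤ j ∧ j ≤ l then
      g.set (i - 1).toNat ((g.getD (i - 1).toNat []).set (j - 1).toNat ch)
    else g
  | _ => g

def redraw_alt (height : Int) (length : Int) (position : List Int) (target_position : List Int) (asteroid_positions : List (List Int)) : String :=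
  let g0 := List.replicate (max height 0).toNat (List.replicate (max length 0).toNat '~')
  let g1 := asteroid_positions.foldl (fun g a => pvPaint height length g a 'x') g0
  let g2 := pvPaint height length g1 target_position 'o'
  let g3 := pvPaint height length g2 position '+'
  String.ofList ((g3.map (fun row => row ++ ['\n'])).flatten)

-- ===== PRECONDITION & SPEC =====
def Spec_redraw (height : Int) (length : Int) (position : List Int) (target_position : List Int) (asteroid_positions : List (List Int)) (out : String) : Prop := out = redraw_alt height length position target_position asteroid_positions
instance (height : Int) (length : Int) (position : List Int) (target_position : List Int) (asteroid_positions : List (List Int)) (out : String) : Decidable (Spec_redraw height length position target_position asteroid_positions out) := by unfold Spec_redraw; infer_instance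

-- ===== CLAIM (what is proved, stated in full; the proofs are below) =====
def Claim_equal_redraw : Prop := ∀ (height : Int) (length : Int) (position : List Int) (target_position : List Int) (asteroid_positions : List (List Int)), Dom_redraw height length position target_position asteroid_positions → Spec_redraw height length position target_position asteroid_positions (redraw height length position target_position asteroid_positions)

-- ===== LEMMAS AND PROOFS =====

-- the character A prints at one-based cell (i, j)
def pvCell (pos tgt : List Int) (asts : List (List Int)) (i j : Int) : Char :=
  if [i, j] = pos then '+' else if [i, j] = tgt then 'o' else if [i, j] ∈ asts then 'x' else '~'

-- read grid at zero-based (i, j)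
def pvAt (g : List (List Char)) (i j : Nat) : Char := (g.getD i []).getD j '~'

-- shape of a grid: hn rows of ln columns
def pvShape (g : List (List Char)) (hn ln : Nat) : Prop :=
  g.length = hn ∧ ∀ r ∈ g, r.length = ln

theorem pvShape_paint (h l : Int) (g : List (List Char)) (c : List Int) (ch : Char)
    {hn ln : Nat} (hs : pvShape g hn ln) : pvShape (pvPaint h l g c ch) hn ln := by
  obtain ⟨h1, h2⟩ := hs
  rcases c with _ | ⟨a, _ | ⟨b, _ | ⟨x, rest⟩⟩⟩ <;> simp only [pvPaint]
  · exact ⟨h1, h2⟩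
  · exact ⟨h1, h2⟩
  · split
    · refine ⟨by simp [h1], ?_⟩
      intro r hr
      rcases List.mem_or_eq_of_mem_set hr with hr' | hr'
      · exact h2 r hr'
      · by_cases hk : (a - 1).toNat < g.length
        · subst hr'
          rw [List.length_set, List.getD_eq_getElem _ _ hk]
          exact h2 _ (List.getElem_mem hk)
        · rw [List.set_eq_of_length_le (by omega)] at hr
          exact h2 r hr
    · exact ⟨h1, h2⟩
  · exact ⟨h1, h2⟩

theorem pvAt_paint (h l : Int) (g : List (List Char)) (c : List Int) (ch : Char)
    {hn ln : Nat} (hs : pvShape g hn ln)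
    (hhn : hn = (max h 0).toNat) (hln : ln = (max l 0).toNat)
    {i j : Nat} (hi : i < hn) (hj : j < ln) :
    pvAt (pvPaint h l g c ch) i j = if c = [(i : Int) + 1, (j : Int) + 1] then ch else pvAt g i j := by
  obtain ⟨h1, h2⟩ := hs
  have higl : i < g.length := by omega
  have hrowlen : (g.getD i []).length = ln := by
    rw [List.getD_eq_getElem _ _ higl]; exact h2 _ (List.getElem_mem higl)
  rcases c with _ | ⟨a, _ | ⟨b, _ | ⟨x, rest⟩⟩⟩ <;> simp only [pvPaint]
  · simp
  · simp
  · by_cases hb : 1 ≤ a ∧ a ≤ h ∧ 1 ≤ b ∧ b ≤ l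
    · rw [if_pos hb]
      have e1 : (a - 1).toNat = a.toNat - 1 := by omega
      have e2 : (b - 1).toNat = b.toNat - 1 := by omega
      have hga : a.toNat - 1 < g.length := by omega
      have hrow : (g[a.toNat - 1]?.getD []).length = ln := by
        have h3 := h2 _ (List.getElem_mem hga)
        simpa [List.getElem?_eq_getElem hga] using h3
      have hjr : j < (g[a.toNat - 1]?.getD []).length := by omega
      simp only [pvAt, List.getD_eq_getElem?_getD, List.getElem?_set, e1, e2]
      by_cases hia : a.toNat - 1 = i
      · by_cases hjb : b.toNat - 1 = j
        · have hc : ([a, b] : List Int) = [(i : Int) + 1, (j : Int) + 1] := by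
            simp only [List.cons.injEq, and_true]; omega
          rw [if_pos hc]
          have hjr' : j < (g[i]?.getD []).length := hia ▸ hjr
          have hjg : j < g[i].length := by
            simpa [List.getElem?_eq_getElem higl] using hjr'
          simp [hia, hjb, higl, hjg]
        · have hc : ¬ ([a, b] : List Int) = [(i : Int) + 1, (j : Int) + 1] := by
            simp only [List.cons.injEq, and_true]; omega
          rw [if_neg hc]
          simp [hia, hjb, higl]
      · have hc : ¬ ([a, b] : List Int) = [(i : Int) + 1, (j : Int) + 1] := by
          simp only [List.cons.injEq, and_true]; omega
        rw [if_neg hc]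
        simp [hia]
    · rw [if_neg hb]
      have hc : ¬ ([a, b] : List Int) = [(i : Int) + 1, (j : Int) + 1] := by
        simp only [List.cons.injEq, and_true]; omega
      rw [if_neg hc]
  · simp

theorem pvShape_fold (h l : Int) (asts : List (List Int)) (g : List (List Char))
    {hn ln : Nat} (hs : pvShape g hn ln) :
    pvShape (asts.foldl (fun g a => pvPaint h l g a 'x') g) hn ln := by
  induction asts generalizing g with
  | nil => exact hs
  | cons a as ih => exact ih _ (pvShape_paint h l g a 'x' hs)

theorem pvAt_fold (h l : Int) (asts : List (List Int)) (g : List (List Char))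
    {hn ln : Nat} (hs : pvShape g hn ln)
    (hhn : hn = (max h 0).toNat) (hln : ln = (max l 0).toNat)
    {i j : Nat} (hi : i < hn) (hj : j < ln) :
    pvAt (asts.foldl (fun g a => pvPaint h l g a 'x') g) i j
      = if [(i : Int) + 1, (j : Int) + 1] ∈ asts then 'x' else pvAt g i j := by
  induction asts generalizing g with
  | nil => simp
  | cons a as ih =>
    rw [List.foldl_cons, ih _ (pvShape_paint h l g a 'x' hs),
        pvAt_paint h l g a 'x' hs hhn hln hi hj]
    by_cases hmem : [(i : Int) + 1, (j : Int) + 1] ∈ as <;>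
      by_cases heq : a = [(i : Int) + 1, (j : Int) + 1] <;>
      simp [hmem, heq, List.mem_cons, eq_comm]

theorem redraw_eq_canon (height length : Int) (pos tgt : List Int) (asts : List (List Int)) :
    redraw height length pos tgt asts
      = String.ofList ((PySem.List.pyRange 1 (height + 1) 1).flatMap
          (fun i => (PySem.List.pyRange 1 (length + 1) 1).map (pvCell pos tgt asts i) ++ ['
'])) := by
  unfold redraw
  have hinner : ∀ (i : Int) (m : List Char),
      (PySem.List.pyRange 1 (length + 1) 1).foldl (fun m j =>
        if [i, j] = pos then m ++ ['+']
        else if [i, j] = tgt then m ++ ['o']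
        else if [i, j] ∈ asts then m ++ ['x']
        else m ++ ['~']) m
      = m ++ (PySem.List.pyRange 1 (length + 1) 1).map (pvCell pos tgt asts i) := by
    intro i m
    have hstep : (fun (m : List Char) (j : Int) =>
        if [i, j] = pos then m ++ ['+']
        else if [i, j] = tgt then m ++ ['o']
        else if [i, j] ∈ asts then m ++ ['x']
        else m ++ ['~'])
        = fun m j => m ++ [pvCell pos tgt asts i j] := by
      funext m j
      simp only [pvCell]
      split_ifs <;> rfl
    rw [hstep, PySem.List.foldl_append_singleton_eq_map]
  have houter : (fun (m : List Char) (i : Int) =>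
      ((PySem.List.pyRange 1 (length + 1) 1).foldl (fun m j =>
        if [i, j] = pos then m ++ ['+']
        else if [i, j] = tgt then m ++ ['o']
        else if [i, j] ∈ asts then m ++ ['x']
        else m ++ ['~']) m) ++ ['
'])
      = fun m i => m ++ ((PySem.List.pyRange 1 (length + 1) 1).map (pvCell pos tgt asts i) ++ ['
']) := by
    funext m i
    rw [hinner, List.append_assoc]
  rw [houter, PySem.List.foldl_append_eq_flatMap, List.nil_append]

theorem alt_grid_eq (height length : Int) (pos tgt : List Int) (asts : List (List Int)) :
    pvPaint height length
        (pvPaint height length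
          (asts.foldl (fun g a => pvPaint height length g a 'x')
            (List.replicate (max height 0).toNat (List.replicate (max length 0).toNat '~')))
          tgt 'o')
        pos '+'
      = (PySem.List.pyRange 1 (height + 1) 1).map
          (fun i => (PySem.List.pyRange 1 (length + 1) 1).map (pvCell pos tgt asts i)) := by
  have hs0 : pvShape (List.replicate (max height 0).toNat (List.replicate (max length 0).toNat '~'))
      ((max height 0).toNat) ((max length 0).toNat) := by
    refine ⟨by simp, ?_⟩
    intro r hr
    simp [List.eq_of_mem_replicate hr]
  have hs1 := pvShape_fold height length asts _ hs0
  have hs2 := pvShape_paint height length _ tgt 'o' hs1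
  have hs3 := pvShape_paint height length _ pos '+' hs2
  apply List.ext_getElem
  · rw [hs3.1, List.length_map, PySem.List.length_pyRange_one]; omega
  · intro i h₁ h₂
    have hi' : i < (max height 0).toNat := by rw [← hs3.1]; exact h₁
    apply List.ext_getElem
    · have hmem := hs3.2 _ (List.getElem_mem h₁)
      rw [hmem, List.getElem_map, List.length_map, PySem.List.length_pyRange_one]; omega
    · intro j hj₁ hj₂
      have hj' : j < (max length 0).toNat := by
        have hmem := hs3.2 _ (List.getElem_mem h₁)
        omega
      have hL : (pvPaint height length
          (pvPaint height length
            (asts.foldl (fun g a => pvPaint height length g a 'x')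
              (List.replicate (max height 0).toNat (List.replicate (max length 0).toNat '~')))
            tgt 'o')
          pos '+')[i][j]
          = pvAt (pvPaint height length
              (pvPaint height length
                (asts.foldl (fun g a => pvPaint height length g a 'x')
                  (List.replicate (max height 0).toNat (List.replicate (max length 0).toNat '~')))
                tgt 'o')
              pos '+') i j := by
        unfold pvAt
        rw [List.getD_eq_getElem _ _ h₁, List.getD_eq_getElem _ _ hj₁]
      rw [hL, pvAt_paint height length _ pos '+' hs2 rfl rfl hi' hj',
          pvAt_paint height length _ tgt 'o' hs1 rfl rfl hi' hj',
          pvAt_fold height length asts _ hs0 rfl rfl hi' hj']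
      have hg0 : pvAt (List.replicate (max height 0).toNat (List.replicate (max length 0).toNat '~')) i j = '~' := by
        simp [pvAt, List.getD_eq_getElem?_getD, hi', hj']
      rw [hg0]
      simp only [List.getElem_map, PySem.List.getElem_pyRange_one]
      have e1 : (1 : Int) + (i : Int) = (i : Int) + 1 := by ring
      have e2 : (1 : Int) + (j : Int) = (j : Int) + 1 := by ring
      simp only [pvCell, e1, e2]
      by_cases hp : pos = [(i : Int) + 1, (j : Int) + 1] <;>
        by_cases ht : tgt = [(i : Int) + 1, (j : Int) + 1] <;>
        by_cases ha : [(i : Int) + 1, (j : Int) + 1] ∈ asts <;>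
        simp [hp, ht, ha, eq_comm]

-- ===== VERDICT (by name: the statement is the Claim_ definition above) =====
theorem redraw_spec : Claim_equal_redraw := by
  intro height length pos tgt asts _
  unfold Spec_redraw
  rw [redraw_eq_canon]
  have halt : redraw_alt height length pos tgt asts
      = String.ofList (((pvPaint height length
          (pvPaint height length
            (asts.foldl (fun g a => pvPaint height length g a 'x')
              (List.replicate (max height 0).toNat (List.replicate (max length 0).toNat '~')))
            tgt 'o')
          pos '+').map (fun row => row ++ ['\n'])).flatten) := rfl
  rw [halt, alt_grid_eq, List.flatMap_def, List.map_map]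
  rfl
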